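-- pv_equiv track=rewrite | github.com/Me-Abdul/Menu-Tracing | utils.py | count_nested_elements
-- ===== SOURCE A (Python) =====
-- def count_nested_elements(lst):
--     # Initialize a dictionary to store the count of nested elements for each element
--
--     nested_elements_count = {}
--     # Initialize a stack to keep track of the current parent elements
--     stack = []
--     for item in lst:
--         depth, element, _, = item
--         while stack and stack[-1][0] >= depth:
--             stack.pop()
--         if stack:
--             parent = stack[-1][1]
--             nested_elements_count[parent] = nested_elements_count.get(parent, 0) + 1
--         stack.append(item)
--     return nested_elements_count
-- ===== SOURCE B (Python) =====
-- def count_nested_elements(lst):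
--     # Two staged passes: first compute, per item, its parent's element (the first
--     # earlier item, most recent first, with strictly smaller depth); then count
--     # the parent occurrences in order, so keys enter the dict in first-seen order.
--     parents = []
--     earlier = []  # items seen so far, most recent first
--     for item in lst:
--         depth, element, _, = item
--         for d2, e2, _x in earlier:
--             if d2 < depth:
--                 parents.append(e2)
--                 break
--         earlier = [item] + earlier
--     counts = {}
--     for p in parents:
--         counts[p] = counts.get(p, 0) + 1
--     return counts
-- ===== Notes on version B (the rewrite author's own statement) =====
-- stated objective: alternative
-- what changed: Replaced A's single pass with a monotone stack (pop on depth >=, then count the stack top) by two staged passes: first build the list of parent elements via a backward scan of the already-seen items for the first strictly shallower predecessor, then a separate counting pass folds that list into the dict.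
import Mathlib
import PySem

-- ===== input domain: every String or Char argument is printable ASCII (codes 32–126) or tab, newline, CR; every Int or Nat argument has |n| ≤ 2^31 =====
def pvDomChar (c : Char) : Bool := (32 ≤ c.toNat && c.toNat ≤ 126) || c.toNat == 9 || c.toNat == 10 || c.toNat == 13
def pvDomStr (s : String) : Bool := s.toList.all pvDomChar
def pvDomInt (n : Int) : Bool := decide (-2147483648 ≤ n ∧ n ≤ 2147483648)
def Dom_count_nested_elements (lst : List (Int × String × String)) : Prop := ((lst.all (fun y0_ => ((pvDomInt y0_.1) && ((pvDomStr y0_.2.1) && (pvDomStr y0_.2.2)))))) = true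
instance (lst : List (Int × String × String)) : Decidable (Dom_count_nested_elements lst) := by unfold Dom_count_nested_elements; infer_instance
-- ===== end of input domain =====

-- B replaces A's one-pass monotone stack by two staged passes: first collect each item's
-- parent (first strictly-shallower earlier item), then count the parents: same values.

-- ===== PORT A =====
-- 'while stack and stack[-1][0] >= depth: stack.pop()'  (stack head = Python's stack top)
def pvPopGE (depth : Int) : List (Int × String × String) → List (Int × String × String)
  | [] => []
  | x :: rest => if x.1 ≥ depth then pvPopGE depth rest else x :: rest

def pvStepA (acc : PySem.Dict String Int × List (Int × String × String))
    (item : Int × String × String) : PySem.Dict String Int × List (Int × String × String) :=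
  let stack := pvPopGE item.1 acc.2
  let counts := match stack with
    | [] => acc.1
    | top :: _ =>
        let parent := top.2.1
        acc.1.insert parent (acc.1.getD parent 0 + 1)
  (counts, item :: stack)

def count_nested_elements (lst : List (Int × String × String)) : List (String × Int) :=
  (lst.foldl pvStepA (PySem.Dict.empty, [])).1.items

-- ===== PORT B =====
-- pass 1 step: inner 'for … in earlier: if d2 < depth: parents.append(e2); break'
-- = first match in 'earlier', i.e. List.find?; 'earlier = [item] + earlier' = cons
def pvStepP (acc : List String × List (Int × String × String))
    (item : Int × String × String) : List String × List (Int × String × String) :=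
  let parents := match acc.2.find? (fun y => decide (y.1 < item.1)) with
    | none => acc.1
    | some p => acc.1 ++ [p.2.1]
  (parents, item :: acc.2)

-- pass 2 step: 'counts[p] = counts.get(p, 0) + 1'
def pvCount (d : PySem.Dict String Int) (p : String) : PySem.Dict String Int :=
  d.insert p (d.getD p 0 + 1)

def count_nested_elements_alt (lst : List (Int × String × String)) : List (String × Int) :=
  ((lst.foldl pvStepP ([], [])).1.foldl pvCount PySem.Dict.empty).items

-- ===== PRECONDITION & SPEC =====
def Spec_count_nested_elements (lst : List (Int × String × String)) (out : List (String × Int)) : Prop := out = count_nested_elements_alt lst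
instance (lst : List (Int × String × String)) (out : List (String × Int)) : Decidable (Spec_count_nested_elements lst out) := by unfold Spec_count_nested_elements; infer_instance

-- ===== CLAIM (what is proved, stated in full; the proofs are below) =====
def Claim_equal_count_nested_elements : Prop := ∀ (lst : List (Int × String × String)), Dom_count_nested_elements lst → Spec_count_nested_elements lst (count_nested_elements lst)

-- ===== LEMMAS AND PROOFS =====

-- invariant tying A's stack to B's most-recent-first list of earlier items: for every depth
-- d, the top of the popped stack is exactly the first earlier item with depth < d
def pvStInv (sA sB : List (Int × String × String)) : Prop :=
  ∀ d : Int, (pvPopGE d sA).head? = sB.find? (fun y => decide (y.1 < d))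

theorem pvPopGE_popGE (d e : Int) (h : e ≤ d) (l : List (Int × String × String)) :
    pvPopGE e (pvPopGE d l) = pvPopGE e l := by
  induction l with
  | nil => rfl
  | cons x rest ih =>
    by_cases hx : x.1 ≥ d
    · have hxe : x.1 ≥ e := le_trans h hx
      simp [pvPopGE, hx, hxe, ih]
    · simp [pvPopGE, hx]

theorem pvStInv_step (sA sB : List (Int × String × String)) (item : Int × String × String)
    (h : pvStInv sA sB) : pvStInv (item :: pvPopGE item.1 sA) (item :: sB) := by
  intro d
  by_cases hd : item.1 ≥ d
  · have hlt : decide (item.1 < d) = false := by simp; omega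
    simp only [pvPopGE, hd, List.find?]
    rw [hlt, pvPopGE_popGE item.1 d hd]
    exact h d
  · have hlt : decide (item.1 < d) = true := by simp; omega
    simp only [pvPopGE, hd, List.find?, hlt]
    rfl

-- pass 1's parent accumulator is append-only
theorem pvStepP_prefix (lst : List (Int × String × String)) (ps : List String)
    (s : List (Int × String × String)) :
    (lst.foldl pvStepP (ps, s)).1 = ps ++ (lst.foldl pvStepP ([], s)).1 := by
  induction lst generalizing ps s with
  | nil => simp
  | cons item rest ih =>
    cases h : s.find? (fun y => decide (y.1 < item.1)) with
    | none =>
      simp only [List.foldl, pvStepP, h]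
      exact ih ps (item :: s)
    | some p =>
      simp only [List.foldl, pvStepP, h]
      rw [ih (ps ++ [p.2.1]), ih ([] ++ [p.2.1])]
      simp

-- main: from related stacks, A's dict = counting B's remaining parent list onto it
theorem pvMain (lst : List (Int × String × String)) (d : PySem.Dict String Int)
    (sA sB : List (Int × String × String)) (h : pvStInv sA sB) :
    (lst.foldl pvStepA (d, sA)).1 = (lst.foldl pvStepP ([], sB)).1.foldl pvCount d := by
  induction lst generalizing d sA sB with
  | nil => rfl
  | cons item rest ih =>
    have hinv := pvStInv_step sA sB item h
    cases hA : pvPopGE item.1 sA with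
    | nil =>
      have hpar : sB.find? (fun y => decide (y.1 < item.1)) = none := by
        rw [← h item.1, hA]; rfl
      simp only [List.foldl, pvStepA, pvStepP, hA, hpar]
      exact ih d _ _ (hA ▸ hinv)
    | cons top tl =>
      have hpar : sB.find? (fun y => decide (y.1 < item.1)) = some top := by
        rw [← h item.1, hA]; rfl
      simp only [List.foldl, pvStepA, pvStepP, hA, hpar]
      rw [pvStepP_prefix rest ([] ++ [top.2.1]) (item :: sB), List.foldl_append]
      exact ih _ _ _ (hA ▸ hinv)

-- ===== VERDICT (by name: the statement is the Claim_ definition above) =====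
theorem count_nested_elements_spec : Claim_equal_count_nested_elements := by
  intro lst _
  unfold Spec_count_nested_elements count_nested_elements count_nested_elements_alt
  rw [pvMain lst PySem.Dict.empty [] [] (by intro d; rfl)]
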